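-- pv_equiv track=rewrite | github.com/lnxhigh/Baekjoon | 프로그래머스/2/12981. 영어 끝말잇기/영어 끝말잇기.py | solution
-- ===== SOURCE A (Python) =====
-- def solution(n, words):
--     prev = words[0][0]
--     wordList = []
--
--     over = False
--     for i, word in enumerate(words):
--         if over: break
--
--         person = i % n + 1
--         turn = i // n + 1
--
--         if prev[-1] != word[0]:
--             over = True
--         if word in wordList:
--             over = True
--
--         wordList.append(word)
--         prev = word
--
--     if not over:
--         person, turn = 0, 0
--
--     return [ person, turn ]
-- ===== SOURCE B (Python) =====
-- def solution(n, words):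
--     m = len(words)
--     # first index whose word already occurred earlier (one safe pass over a seen set)
--     dup = None
--     seen = set()
--     for i, w in enumerate(words):
--         if w in seen:
--             dup = i
--             break
--         seen.add(w)
--     # first chain-link mismatch; no break can lie past the duplicate, so stop there
--     stop = m if dup is None else dup + 1
--     link = next((i for i in range(1, stop) if words[i][0] != words[i - 1][-1]), None)
--     candidates = [c for c in (link, dup) if c is not None]
--     if not candidates:
--         return [0, 0]
--     i = min(candidates)
--     return [i % n + 1, i // n + 1]
-- ===== Notes on version B (the rewrite author's own statement) =====
-- stated objective: alternative
-- what changed: Replaces A's single flag-driven loop carrying prev/wordList/over state with two separate scans (first repeated word via a seen set, then first chain-link mismatch over indices, stopped at the duplicate) combined by min of the existing candidates.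
import Mathlib
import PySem

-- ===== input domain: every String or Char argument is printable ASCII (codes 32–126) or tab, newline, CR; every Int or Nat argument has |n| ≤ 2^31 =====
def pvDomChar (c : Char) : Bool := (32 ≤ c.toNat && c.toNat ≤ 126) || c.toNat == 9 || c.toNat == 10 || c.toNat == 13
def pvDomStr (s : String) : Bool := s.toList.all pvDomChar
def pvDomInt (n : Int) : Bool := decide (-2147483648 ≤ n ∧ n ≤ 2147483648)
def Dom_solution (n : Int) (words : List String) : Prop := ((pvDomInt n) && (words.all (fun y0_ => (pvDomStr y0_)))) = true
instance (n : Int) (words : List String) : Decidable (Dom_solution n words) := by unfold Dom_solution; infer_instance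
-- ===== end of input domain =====

-- B replaces A's single flag-driven loop with two separate scans (first repeated word via a seen set,
-- then first link mismatch, stopped at the duplicate) combined by min — an alternative decomposition.

-- ===== PORT A =====
-- the for-loop of A: state (i, prev, wordList, person, turn); the 'over' flag becomes an early return
def solutionGo (n : Int) (ws : List String) (i : Int) (prev : String)
    (wl : List String) (person turn : Int) : Int × Int × Bool :=
  match ws with
  | [] => (person, turn, false)
  | w :: rest =>
    let person := PySem.Int.mod i n + 1
    let turn := PySem.Int.floordiv i n + 1
    if (decide (PySem.Str.pyGet? prev (-1) ≠ PySem.Str.pyGet? w 0) || wl.contains w) then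
      (person, turn, true)
    else solutionGo n rest (i + 1) w (wl ++ [w]) person turn

def solution (n : Int) (words : List String) : List Int :=
  -- prev = words[0][0] (a one-character string; none = IndexError, excluded by Pre_)
  let prev0 : String :=
    match (PySem.List.pyGet? words 0).bind (fun w => PySem.Str.pyGet? w 0) with
    | some c => String.ofList [c]
    | none => ""
  let r := solutionGo n words 0 prev0 [] 0 0
  if r.2.2 then [r.1, r.2.1] else [0, 0]

-- ===== PORT B =====
-- words[i][j] as an Option (none = IndexError, excluded by Pre_)
def chAt (ws : List String) (i j : Int) : Option Char :=
  (PySem.List.pyGet? ws i).bind (fun w => PySem.Str.pyGet? w j)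

-- the seen-set loop of Source B
def dupGo (ws : List String) (i : Int) (seen : PySem.Set String) : Option Int :=
  match ws with
  | [] => none
  | w :: rest =>
    if PySem.Set.contains seen w then some i
    else dupGo rest (i + 1) (PySem.Set.add seen w)

def solution_alt (n : Int) (words : List String) : List Int :=
  let m : Int := (words.length : Int)
  let dup := dupGo words 0 PySem.Set.empty
  -- stop = m if dup is None else dup + 1
  let stop : Int := match dup with | none => m | some d => d + 1
  -- next((i for i in range(1, stop) if words[i][0] != words[i-1][-1]), None)
  let link := (PySem.List.pyRange 1 stop 1).find?
    (fun i => decide (chAt words i 0 ≠ chAt words (i - 1) (-1)))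
  let cands := ([link, dup].filterMap id)
  match PySem.List.min? cands (fun x => x) with
  | none => [0, 0]
  | some i => [PySem.Int.mod i n + 1, PySem.Int.floordiv i n + 1]

-- ===== PRECONDITION & SPEC =====
-- A's break test at index j, stated on the raw input (no port code)
def pvBreakAt (ws : List String) (j : Nat) : Bool :=
  (decide (1 ≤ j) && decide ((ws.getD j "").toList.head? ≠ (ws.getD (j - 1) "").toList.getLast?))
  || (ws.take j).contains (ws.getD j "")

-- A raises exactly when n = 0 (ZeroDivisionError), words is empty (IndexError), or its loop reaches an
-- empty word with no break before it (IndexError on word[0]); Pre_ excludes exactly those inputs.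
def Pre_solution (n : Int) (words : List String) : Prop :=
  n ≠ 0 ∧ words ≠ [] ∧
    ∀ e < words.length, words.getD e "" = "" → ∃ j < e, pvBreakAt words j = true
instance (n : Int) (words : List String) : Decidable (Pre_solution n words) := by
  unfold Pre_solution; infer_instance

def pvWitness_solution : Int × List String := (2, ["ab", "ba"])

def Spec_solution (n : Int) (words : List String) (out : List Int) : Prop := out = solution_alt n words
instance (n : Int) (words : List String) (out : List Int) : Decidable (Spec_solution n words out) := by
  unfold Spec_solution; infer_instance

-- ===== CLAIM (what is proved, stated in full; the proofs are below) =====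
def Claim_equal_solution : Prop := ∀ (n : Int) (words : List String),
  Dom_solution n words → Pre_solution n words → Spec_solution n words (solution n words)

-- ===== LEMMAS AND PROOFS =====

-- reference: the first break index exactly as A's loop tests it
def fb (prev : String) (wl : List String) (i : Int) : List String → Option Int
  | [] => none
  | w :: rest =>
    if (decide (PySem.Str.pyGet? prev (-1) ≠ PySem.Str.pyGet? w 0) || wl.contains w) then some i
    else fb w (wl ++ [w]) (i + 1) rest

-- B's 'min of the existing candidates' on two optional candidates
def omin : Option Int → Option Int → Option Int
  | none, b => b
  | a, none => a
  | some x, some y => some (min x y)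

theorem solutionGo_of_fb_some (n : Int) (t : List String) (prev : String) (wl : List String)
    (i p q j : Int) (h : fb prev wl i t = some j) :
    solutionGo n t i prev wl p q = (PySem.Int.mod j n + 1, PySem.Int.floordiv j n + 1, true) := by
  induction t generalizing prev wl i p q with
  | nil => simp [fb] at h
  | cons w rest ih =>
    rw [fb] at h
    rw [solutionGo]
    by_cases hc : (decide (PySem.Str.pyGet? prev (-1) ≠ PySem.Str.pyGet? w 0) || wl.contains w) = true
    · rw [if_pos hc] at h
      rw [if_pos hc]
      injection h with h
      rw [h]
    · rw [if_neg hc] at h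
      rw [if_neg hc]
      exact ih _ _ _ _ _ h

theorem solutionGo_of_fb_none (n : Int) (t : List String) (prev : String) (wl : List String)
    (i p q : Int) (h : fb prev wl i t = none) :
    (solutionGo n t i prev wl p q).2.2 = false := by
  induction t generalizing prev wl i p q with
  | nil => simp [solutionGo]
  | cons w rest ih =>
    rw [fb] at h
    rw [solutionGo]
    by_cases hc : (decide (PySem.Str.pyGet? prev (-1) ≠ PySem.Str.pyGet? w 0) || wl.contains w) = true
    · rw [if_pos hc] at h; exact absurd h (by simp)
    · rw [if_neg hc] at h
      rw [if_neg hc]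
      exact ih _ _ _ _ _ h

theorem dupGo_ge (t : List String) (i j : Int) (seen : PySem.Set String)
    (h : dupGo t i seen = some j) : i ≤ j := by
  induction t generalizing i seen with
  | nil => simp [dupGo] at h
  | cons w rest ih =>
    rw [dupGo] at h
    by_cases hc : PySem.Set.contains seen w = true
    · rw [if_pos hc] at h; injection h with h; omega
    · rw [if_neg hc] at h
      have := ih _ _ h
      omega

theorem dupGo_lt (t : List String) (i j : Int) (seen : PySem.Set String)
    (h : dupGo t i seen = some j) : j < i + (t.length : Int) := by
  induction t generalizing i seen with
  | nil => simp [dupGo] at h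
  | cons w rest ih =>
    rw [dupGo] at h
    by_cases hc : PySem.Set.contains seen w = true
    · rw [if_pos hc] at h; injection h with h; simp; omega
    · rw [if_neg hc] at h
      have := ih _ _ h
      simp only [List.length_cons]
      push_cast
      omega

theorem find?_range_ge (a b j : Int) (p : Int → Bool)
    (h : (PySem.List.pyRange a b 1).find? p = some j) : a ≤ j := by
  have := List.mem_of_find?_eq_some h
  exact (PySem.List.mem_pyRange_one.mp this).1

theorem chAt_here (pfx : List String) (w : String) (t : List String) :
    chAt (pfx ++ w :: t) (pfx.length : Int) 0 = PySem.Str.pyGet? w 0 := by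
  unfold chAt
  rw [PySem.List.pyGet?_append_length]
  rfl

theorem chAt_prev (pfx : List String) (h : pfx ≠ []) (t : List String) :
    chAt (pfx ++ t) ((pfx.length : Int) - 1) (-1) = PySem.Str.pyGet? (pfx.getLast h) (-1) := by
  unfold chAt
  have e1 : pfx ++ t = pfx.dropLast ++ (pfx.getLast h :: t) := by
    conv_lhs => rw [← List.dropLast_append_getLast h]
    simp
  have hlen : 0 < pfx.length := List.length_pos_iff.mpr h
  have e2 : (pfx.length : Int) - 1 = (pfx.dropLast.length : Int) := by
    simp [List.length_dropLast]
    omega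
  rw [e1, e2, PySem.List.pyGet?_append_length]
  rfl

theorem ofList_append_singleton (l : List String) (w : String) :
    PySem.Set.ofList (l ++ [w]) = PySem.Set.add (PySem.Set.ofList l) w := by
  simp [PySem.Set.ofList_eq_foldl]

theorem contains_ofList (l : List String) (w : String) :
    PySem.Set.contains (PySem.Set.ofList l) w = true ↔ w ∈ l := by
  simp [pysem]

-- the key invariant: A's remaining loop equals min of B's two remaining scans (link scan uncapped)
theorem fb_eq_omin (t : List String) (pfx : List String) (hpfx : pfx ≠ []) :
    fb (pfx.getLast hpfx) pfx (pfx.length : Int) t =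
      omin ((PySem.List.pyRange (pfx.length : Int) ((pfx.length : Int) + (t.length : Int)) 1).find?
              (fun k => decide (chAt (pfx ++ t) k 0 ≠ chAt (pfx ++ t) (k - 1) (-1))))
           (dupGo t (pfx.length : Int) (PySem.Set.ofList pfx)) := by
  induction t generalizing pfx with
  | nil =>
    rw [fb, dupGo, PySem.List.pyRange_one_eq_nil (by simp)]
    rfl
  | cons w rest ih =>
    have hrange : PySem.List.pyRange (pfx.length : Int) ((pfx.length : Int) + ((w :: rest).length : Int)) 1
        = (pfx.length : Int) :: PySem.List.pyRange ((pfx.length : Int) + 1) ((pfx.length : Int) + ((w :: rest).length : Int)) 1 := by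
      rw [PySem.List.pyRange_one_cons (by simp)]
    rw [fb, dupGo, hrange]
    by_cases hm : PySem.Str.pyGet? (pfx.getLast hpfx) (-1) = PySem.Str.pyGet? w 0
    · -- no link break at this index
      have hpredf : (decide (chAt (pfx ++ w :: rest) ((pfx.length : Int)) 0
          ≠ chAt (pfx ++ w :: rest) ((pfx.length : Int) - 1) (-1))) = false := by
        rw [chAt_here, chAt_prev pfx hpfx]
        exact decide_eq_false (fun hne' => hne' hm.symm)
      rw [List.find?_cons_of_neg
        (p := fun k => decide (chAt (pfx ++ w :: rest) k 0 ≠ chAt (pfx ++ w :: rest) (k - 1) (-1)))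
        (by simp only [hpredf]; exact Bool.false_ne_true)]
      by_cases hd : w ∈ pfx
      · -- duplicate here: A breaks at i; B's dup candidate is i, link candidate (if any) is ≥ i+1
        rw [if_pos (by simp [hd])]
        rw [if_pos ((contains_ofList pfx w).mpr hd)]
        cases hL : (PySem.List.pyRange ((pfx.length : Int) + 1) ((pfx.length : Int) + ((w :: rest).length : Int)) 1).find?
            (fun k => decide (chAt (pfx ++ w :: rest) k 0 ≠ chAt (pfx ++ w :: rest) (k - 1) (-1))) with
        | none => rfl
        | some j =>
          have hj := find?_range_ge _ _ _ _ hL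
          simp [omin]
          omega
      · -- no break here: recurse; both sides shift to index i+1
        rw [if_neg (by
          simp only [Bool.or_eq_true, decide_eq_true_eq, not_or]
          exact ⟨not_not_intro hm, by simp [hd]⟩)]
        rw [if_neg (by simp [hd])]
        have ih' := ih (pfx ++ [w]) (by simp)
        rw [ofList_append_singleton] at ih'
        have e1 : (pfx ++ [w]).getLast (by simp) = w := by simp
        have e2 : ((pfx ++ [w]).length : Int) = (pfx.length : Int) + 1 := by simp
        have e3 : (pfx ++ [w]) ++ rest = pfx ++ w :: rest := by simp
        rw [e1, e2, e3] at ih'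
        have e5 : (pfx.length : Int) + 1 + (rest.length : Int)
            = (pfx.length : Int) + ((w :: rest).length : Int) := by simp; omega
        rw [e5] at ih'
        exact ih'
    · -- link break at this index: A breaks at i; B's link candidate is i, dup candidate is ≥ i
      rw [if_pos (by rw [Bool.or_eq_true]; exact Or.inl (decide_eq_true hm))]
      have hpredt : (decide (chAt (pfx ++ w :: rest) ((pfx.length : Int)) 0
          ≠ chAt (pfx ++ w :: rest) ((pfx.length : Int) - 1) (-1))) = true := by
        rw [chAt_here, chAt_prev pfx hpfx]
        exact decide_eq_true (fun hh => hm hh.symm)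
      rw [List.find?_cons_of_pos
        (p := fun k => decide (chAt (pfx ++ w :: rest) k 0 ≠ chAt (pfx ++ w :: rest) (k - 1) (-1)))
        hpredt]
      by_cases hd : PySem.Set.contains (PySem.Set.ofList pfx) w = true
      · rw [if_pos hd]; simp [omin]
      · rw [if_neg hd]
        cases hD : dupGo rest ((pfx.length : Int) + 1) (PySem.Set.add (PySem.Set.ofList pfx) w) with
        | none => rfl
        | some j =>
          have hj := dupGo_ge _ _ _ _ hD
          simp [omin]
          omega

theorem min?_pair (a b : Option Int) :
    PySem.List.min? ([a, b].filterMap id) (fun x => x) = omin a b := by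
  cases a with
  | none =>
    cases b with
    | none => simp [omin, PySem.List.min?_eq_none_iff]
    | some y => simp [omin]; rw [PySem.List.min?_id_cons]; rfl
  | some x =>
    cases b with
    | none => simp [omin]; rw [PySem.List.min?_id_cons]; rfl
    | some y => simp [omin]; rw [PySem.List.min?_id_cons]; simp

-- capping the link scan at the duplicate does not change the min of the two candidates
theorem cap_find_omin (p : Int → Bool) (m d : Int) (h0 : 0 ≤ d) (h1 : d < m) :
    omin ((PySem.List.pyRange 1 (d + 1) 1).find? p) (some d)
      = omin ((PySem.List.pyRange 1 m 1).find? p) (some d) := by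
  rw [PySem.List.pyRange_one_append 1 (d + 1) m (by omega) (by omega), List.find?_append]
  cases hc : (PySem.List.pyRange 1 (d + 1) 1).find? p with
  | some j => rfl
  | none =>
    cases hr : (PySem.List.pyRange (d + 1) m 1).find? p with
    | none => rfl
    | some j =>
      have hj := find?_range_ge _ _ _ _ hr
      simp [omin]
      omega

theorem solution_eq (n : Int) (words : List String) (hp : Pre_solution n words) :
    solution n words = solution_alt n words := by
  obtain ⟨-, hw, hpre⟩ := hp
  cases words with
  | nil => exact absurd rfl hw
  | cons w0 t =>
    -- the head word is nonempty (otherwise Pre_ would demand a break before index 0)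
    have hw0 : w0 ≠ "" := by
      intro hz
      obtain ⟨j, hj, -⟩ := hpre 0 (by simp) (by simpa using hz)
      omega
    obtain ⟨c0, cs, hc⟩ : ∃ c cs, w0.toList = c :: cs := by
      cases h : w0.toList with
      | nil => exact absurd (by rw [← w0.ofList_toList, h]) hw0
      | cons c cs => exact ⟨c, cs, rfl⟩
    have hget0 : PySem.Str.pyGet? w0 0 = some c0 := by
      simp [pysem, hc]
    -- A's prev0 is the one-character string words[0][0]
    have hprev0 : ((PySem.List.pyGet? (w0 :: t) 0).bind (fun w => PySem.Str.pyGet? w 0))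
        = some c0 := by
      rw [PySem.List.pyGet?_zero_cons]
      simpa using hget0
    -- step 0 never breaks: prev0[-1] = words[0][0] = c0 and wordList is empty
    have hfb0 : fb (String.ofList [c0]) [] 0 (w0 :: t) = fb w0 [w0] 1 t := by
      rw [fb]
      rw [if_neg (by simp [pysem, hc])]
      norm_num
    -- B's uncapped link scan, starting at index 1
    have hkey := fb_eq_omin t [w0] (List.cons_ne_nil _ _)
    have hdup : dupGo (w0 :: t) 0 PySem.Set.empty = dupGo t 1 (PySem.Set.ofList [w0]) := by
      rw [dupGo]
      rw [if_neg (by simp [pysem])]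
      rfl
    have hm : (((w0 :: t).length : Nat) : Int) = 1 + (t.length : Int) := by simp; omega
    have hkey' : fb w0 [w0] 1 t
        = omin ((PySem.List.pyRange 1 (((w0 :: t).length : Nat) : Int) 1).find?
              (fun k => decide (chAt (w0 :: t) k 0 ≠ chAt (w0 :: t) (k - 1) (-1))))
            (dupGo (w0 :: t) 0 PySem.Set.empty) := by
      rw [hdup, hm]
      simpa using hkey
    -- the capped link scan of B gives the same min
    have hcap : omin ((PySem.List.pyRange 1
          (match dupGo (w0 :: t) 0 PySem.Set.empty with
           | none => (((w0 :: t).length : Nat) : Int)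
           | some d => d + 1) 1).find?
            (fun k => decide (chAt (w0 :: t) k 0 ≠ chAt (w0 :: t) (k - 1) (-1))))
          (dupGo (w0 :: t) 0 PySem.Set.empty)
        = fb w0 [w0] 1 t := by
      cases hD : dupGo (w0 :: t) 0 PySem.Set.empty with
      | none => rw [hkey', hD]
      | some d =>
        have hd0 := dupGo_ge _ _ _ _ hD
        have hd1 : d < (((w0 :: t).length : Nat) : Int) := by
          have := dupGo_lt _ _ _ _ hD; omega
        rw [show (match (some d : Option Int) with
             | none => (((w0 :: t).length : Nat) : Int)
             | some d => d + 1) = d + 1 from rfl]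
        rw [cap_find_omin _ _ _ hd0 hd1, hkey', hD]
    -- assemble both sides
    simp only [solution, solution_alt, hprev0]
    rw [min?_pair, hcap, ← hfb0]
    cases hF : fb (String.ofList [c0]) [] 0 (w0 :: t) with
    | none =>
      rw [solutionGo_of_fb_none n (w0 :: t) _ _ 0 0 0 hF]
      rfl
    | some j =>
      rw [solutionGo_of_fb_some n (w0 :: t) _ _ 0 0 0 j hF]
      rfl

-- ===== VERDICT (by name: the statement is the Claim_ definition above) =====
theorem solution_spec : Claim_equal_solution := by
  intro n words _ hp
  unfold Spec_solution
  exact solution_eq n words hp
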